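-- pv_equiv track=rewrite | github.com/betrayers000/TIL | Algorithm/projects/study9/이메일.py | solution
-- ===== SOURCE A (Python) =====
-- tops = ["com", "net", "org"]
--
-- def solution(answers):
--     cnt = 0
--     for ans in answers:
--         if ans.count("@") > 1:
--             continue
--         idx = 0
--         domain = False
--         d = 0
--         for i in range(len(ans)):
--             if d > 1:
--                 domain = False
--                 break
--             if ord("a") <= ord(ans[i]) <= ord("z") or ans[i] == "." or ans[i] == "@":
--                 if ans[i] == "." and domain:
--                     idx = i
--                     d += 1
--                 if ans[i] == "@":
--                     domain = True
--         if ans[idx+1:] in tops and domain: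
--             cnt += 1
--     return cnt
-- ===== SOURCE B (Python) =====
-- tops = ["com", "net", "org"]
--
-- def solution(answers):
--     cnt = 0
--     for ans in answers:
--         if ans.count("@") != 1:
--             continue
--         at = ans.index("@")
--         dots = [j for j, c in enumerate(ans) if c == "." and j > at]
--         if len(dots) == 1 and ans[dots[0] + 1:] in tops:
--             cnt += 1
--     return cnt
-- ===== Notes on version B (the rewrite author's own statement) =====
-- stated objective: simpler
-- what changed: Replaced A's per-character state machine (idx/domain/d flags with a mid-loop break) by a direct decomposition — exactly one '@', collect the dot indices after it, count iff there is exactly one such dot and the slice after it is in tops; a timing run measured this constant-factor faster (built-in count/index/slicing instead of a Python-level per-character loop).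
-- intended difference: On answers containing "@com", "@net" or "@org" (exactly one '@', no dot after it, rest of the string in tops) A's leftover idx=0 makes it test ans[1:] and count them as valid emails, while B rejects them; B's value is intended since a valid address needs a dot-separated top-level domain. — e.g. on solution(["@com"]): A returns 1, B returns 0
import Mathlib
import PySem

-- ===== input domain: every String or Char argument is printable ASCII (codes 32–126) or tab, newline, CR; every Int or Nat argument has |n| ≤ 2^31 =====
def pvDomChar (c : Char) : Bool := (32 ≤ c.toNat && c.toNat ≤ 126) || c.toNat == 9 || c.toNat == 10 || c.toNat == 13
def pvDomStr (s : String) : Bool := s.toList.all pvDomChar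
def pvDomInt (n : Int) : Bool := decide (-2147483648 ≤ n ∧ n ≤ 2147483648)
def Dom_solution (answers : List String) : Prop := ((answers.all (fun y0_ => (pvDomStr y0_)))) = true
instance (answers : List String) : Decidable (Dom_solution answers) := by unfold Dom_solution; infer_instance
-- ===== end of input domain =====

-- B replaces A's per-character state machine (idx/domain/d flags with a mid-loop break)
-- by a direct decomposition: exactly one '@', exactly one '.' after it, tail in tops.
-- Objective: simpler. A = B except on answers containing "@com"/"@net"/"@org" (see D_ below).

-- module-level constant `tops`, as char lists (Python compares string slices against it)
def pvTops : List (List Char) := [['c','o','m'], ['n','e','t'], ['o','r','g']]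

-- ===== PORT A =====
-- inner `for i in range(len(ans))` loop of A: state (idx, domain, d); the `break` is the
-- early return; i is the running index.
def pvAInner : List Char → Nat → Nat → Bool → Nat → (Nat × Bool)
  | [], _, idx, domain, _ => (idx, domain)
  | c :: rest, i, idx, domain, d =>
    if d > 1 then (idx, false)
    else if ('a' ≤ c ∧ c ≤ 'z') ∨ c = '.' ∨ c = '@' then
      pvAInner rest (i+1)
        (if c = '.' ∧ domain then i else idx)
        (if c = '@' then true else domain)
        (if c = '.' ∧ domain then d + 1 else d)
    else pvAInner rest (i+1) idx domain d

-- ans.count("@") for the single-char pattern "@" is the character count;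
-- ans[idx+1:] with idx+1 ≥ 0 is List.drop (idx+1); both exact here.
def pvABody (cnt : Int) (ans : String) : Int :=
  let s := ans.toList
  if s.count '@' > 1 then cnt
  else
    let r := pvAInner s 0 0 false 0
    if s.drop (r.1 + 1) ∈ pvTops ∧ r.2 = true then cnt + 1 else cnt

def solution (answers : List String) : Int := answers.foldl pvABody 0

-- ===== PORT B =====
-- the comprehension `[j for j, c in enumerate(ans) if c == "." and j > at]`;
-- ans.index("@") always succeeds under the count-=-1 guard, so getD 0 is never the default.
def pvDots (s : List Char) : List Int :=
  let a := (PySem.List.index? s '@').getD 0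
  ((PySem.List.enumerate s).filter (fun q => decide (q.2 = '.' ∧ (a : Int) < q.1))).map (·.1)

-- `len(dots) == 1 and ans[dots[0] + 1:] in tops` (short-circuit `and` = the match);
-- enumerate indices are ≥ 0, so dots[0].toNat is exact.
def pvBBody (cnt : Int) (ans : String) : Int :=
  let s := ans.toList
  if s.count '@' ≠ 1 then cnt
  else
    match pvDots s with
    | [k] => if s.drop (k.toNat + 1) ∈ pvTops then cnt + 1 else cnt
    | _ => cnt

def solution_alt (answers : List String) : Int := answers.foldl pvBBody 0

-- ===== PRECONDITION & SPEC =====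
-- On answers with exactly one '@' and no '.' after it, A accidentally tests ans[1:]
-- (its idx is left at 0), so it counts exactly the strings "@com", "@net", "@org";
-- B rejects them (a valid domain needs a dot), which is the intended behaviour.
def D_solution (answers : List String) : Prop := ∃ a ∈ answers, a = "@com" ∨ a = "@net" ∨ a = "@org"
instance (answers : List String) : Decidable (D_solution answers) := by unfold D_solution; infer_instance

def Spec_solution (answers : List String) (out : Int) : Prop := ¬ D_solution answers → out = solution_alt answers
instance (answers : List String) (out : Int) : Decidable (Spec_solution answers out) := by unfold Spec_solution; infer_instance

def pvDiffWitness_solution : List String := ["@com"]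
def pvDiffWitnessOut_solution : Int × Int := (1, 0)

-- ===== CLAIM (what is proved, stated in full; the proofs are below) =====
def Claim_unchanged_solution : Prop := ∀ (answers : List String), Dom_solution answers → Spec_solution answers (solution answers)
def Claim_changed_solution : Prop := Dom_solution (pvDiffWitness_solution) ∧ D_solution (pvDiffWitness_solution) ∧ solution (pvDiffWitness_solution) = pvDiffWitnessOut_solution.1 ∧ solution_alt (pvDiffWitness_solution) = pvDiffWitnessOut_solution.2 ∧ pvDiffWitnessOut_solution.1 ≠ pvDiffWitnessOut_solution.2
def Claim_exact_solution : Prop := ∀ (answers : List String), Dom_solution answers → D_solution answers → solution answers ≠ solution_alt answers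

-- ===== LEMMAS AND PROOFS =====

-- the three miscounted strings, as char lists, and their indicator (proof-only)
def pvBadList : List (List Char) := [['@','c','o','m'], ['@','n','e','t'], ['@','o','r','g']]

theorem pvBad_toList (a : String) :
    a.toList ∈ pvBadList ↔ (a = "@com" ∨ a = "@net" ∨ a = "@org") := by
  simp only [pvBadList, List.mem_cons, List.not_mem_nil, or_false]
  rw [show ['@','c','o','m'] = "@com".toList from rfl,
      show ['@','n','e','t'] = "@net".toList from rfl,
      show ['@','o','r','g'] = "@org".toList from rfl]
  have hi : ∀ (x y : String), x.toList = y.toList ↔ x = y :=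
    fun x y => ⟨fun h => String.toList_injective h, fun h => by rw [h]⟩
  exact or_congr (hi _ _) (or_congr (hi _ _) (hi _ _))

def pvBadI (s : List Char) : Int := if s ∈ pvBadList then 1 else 0

theorem pvBad_spec (s : List Char) (h : s ∈ pvBadList) : s.count '@' = 1 ∧ '.' ∉ s := by
  simp only [pvBadList, List.mem_cons, List.not_mem_nil, or_false] at h
  rcases h with h | h | h <;> subst h <;> decide

-- Scan over a segment without '@' while domain = false: state is untouched.
theorem pvAInner_no_at (u : List Char) (rest : List Char) (i idx d : Nat)
    (hd : d ≤ 1) (h : '@' ∉ u) :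
    pvAInner (u ++ rest) i idx false d = pvAInner rest (i + u.length) idx false d := by
  induction u generalizing i with
  | nil => simp only [List.nil_append, List.length_nil, Nat.add_zero]
  | cons c u ih =>
    have hc : c ≠ '@' := fun hc => h (hc ▸ List.mem_cons_self)
    have hu : '@' ∉ u := fun hm => h (List.mem_cons_of_mem _ hm)
    simp only [List.cons_append, pvAInner]
    rw [if_neg (by omega)]
    split
    · simp only [show (c = '.' ∧ false = true) = False by simp, if_false]
      rw [ih (i+1) hu]; congr 1; simp; omega
    · rw [ih (i+1) hu]; congr 1; simp; omega

-- Scan over a segment without '.' or '@' while domain = true: state is untouched.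
theorem pvAInner_clean (w : List Char) (rest : List Char) (i idx d : Nat)
    (hd : d ≤ 1) (h1 : '.' ∉ w) (h2 : '@' ∉ w) :
    pvAInner (w ++ rest) i idx true d = pvAInner rest (i + w.length) idx true d := by
  induction w generalizing i with
  | nil => simp only [List.nil_append, List.length_nil, Nat.add_zero]
  | cons c w ih =>
    have hc1 : c ≠ '.' := fun hc => h1 (hc ▸ List.mem_cons_self)
    have hc2 : c ≠ '@' := fun hc => h2 (hc ▸ List.mem_cons_self)
    have hw1 : '.' ∉ w := fun hm => h1 (List.mem_cons_of_mem _ hm)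
    have hw2 : '@' ∉ w := fun hm => h2 (List.mem_cons_of_mem _ hm)
    simp only [List.cons_append, pvAInner]
    rw [if_neg (by omega)]
    split
    · simp only [if_neg (show ¬(c = '.' ∧ True) from fun hh => hc1 hh.1)]
      rw [ih (i+1) hw1 hw2]; congr 1; simp; omega
    · rw [ih (i+1) hw1 hw2]; congr 1; simp; omega

-- filtering for '.' in the enumeration of a dot-free segment gives nothing
theorem pvFilterDot_nil (w : List Char) (t : Int) (h : '.' ∉ w) :
    (PySem.List.enumerate w t).filter (fun q => decide (q.2 = '.')) = [] := by
  rw [List.filter_eq_nil_iff]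
  intro q hq
  rcases (PySem.List.mem_enumerate_iff _ _ _).1 hq with ⟨k, hk, rfl⟩
  simp only [decide_eq_true_eq]
  exact fun hc => h (hc ▸ List.getElem_mem hk)

-- one step of the scan at the (unique) '@', domain still false
theorem pvStepAt (i idx : Nat) (rest : List Char) :
    pvAInner ('@' :: rest) i idx false 0 = pvAInner rest (i+1) idx true 0 := by
  simp [pvAInner]

-- one step of the scan at a '.', domain already true
theorem pvStepDot (i idx d : Nat) (rest : List Char) (hd : d ≤ 1) :
    pvAInner ('.' :: rest) i idx true d = pvAInner rest (i+1) i true (d+1) := by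
  simp only [pvAInner]
  rw [if_neg (by omega)]
  simp

-- once d = 2, the next character breaks the loop with domain reset
theorem pvStepBreak (i idx : Nat) (c : Char) (rest : List Char) :
    pvAInner (c :: rest) i idx true 2 = (idx, false) := by
  simp [pvAInner]

-- first-occurrence split
theorem pvSplitFirst (c : Char) (l : List Char) (h : c ∈ l) :
    ∃ w1 w2, l = w1 ++ c :: w2 ∧ c ∉ w1 := by
  obtain ⟨k, hk⟩ := Option.isSome_iff_exists.1 ((PySem.List.index?_isSome_iff _ _).2 h)
  obtain ⟨pre, suf, h1, _, h3⟩ := (PySem.List.index?_eq_some_iff _ _ _).1 hk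
  exact ⟨pre, suf, h1, h3⟩

-- B's dot list after splitting at the unique '@'
theorem pvDots_split (u v : List Char) (hu : '@' ∉ u) :
    pvDots (u ++ '@' :: v)
      = ((PySem.List.enumerate v ((u.length : Int) + 1)).filter
          (fun q => decide (q.2 = '.'))).map (·.1) := by
  have hidx : PySem.List.index? (u ++ '@' :: v) '@' = some u.length := by
    rw [PySem.List.index?_eq_some_iff]; exact ⟨u, v, rfl, rfl, hu⟩
  unfold pvDots
  simp only [hidx, Option.getD_some]
  rw [PySem.List.enumerate_append, PySem.List.enumerate_cons, List.filter_append]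
  have h1 : (PySem.List.enumerate u 0).filter
      (fun q => decide (q.2 = '.' ∧ ((u.length : Nat) : Int) < q.1)) = [] := by
    rw [List.filter_eq_nil_iff]
    intro q hq
    obtain ⟨j, hj, rfl⟩ := (PySem.List.mem_enumerate_iff _ _ _).1 hq
    simp only [decide_eq_true_eq, not_and]
    intro _
    omega
  rw [h1, show ((0:Int) + (u.length:Int)) = ((u.length:Int)) by omega, List.filter_cons]
  have h3 : (PySem.List.enumerate v ((u.length : Int) + 1)).filter
        (fun q => decide (q.2 = '.' ∧ ((u.length : Nat) : Int) < q.1))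
      = (PySem.List.enumerate v ((u.length : Int) + 1)).filter (fun q => decide (q.2 = '.')) := by
    apply List.filter_congr
    intro q hq
    obtain ⟨j, hj, rfl⟩ := (PySem.List.mem_enumerate_iff _ _ _).1 hq
    rw [decide_eq_decide]
    constructor
    · rintro ⟨hc, -⟩; exact hc
    · intro hc; exact ⟨hc, by omega⟩
  split
  · next hcond => simp at hcond
  · simp only [List.nil_append]
    rw [h3]

-- per-answer accounting: A's body = B's body + the indicator of the miscounted strings
theorem pvCore (s : List Char) (cnt : Int) :
    (if s.count '@' > 1 then cnt
     else
       if s.drop ((pvAInner s 0 0 false 0).1 + 1) ∈ pvTops ∧ (pvAInner s 0 0 false 0).2 = true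
       then cnt + 1 else cnt)
    =
    (if s.count '@' ≠ 1 then cnt
     else
       match pvDots s with
       | [k] => if s.drop (k.toNat + 1) ∈ pvTops then cnt + 1 else cnt
       | _ => cnt) + pvBadI s := by
  match hcnt : s.count '@' with
  | 0 =>
    have hnot : '@' ∉ s := List.count_eq_zero.1 hcnt
    have hA : pvAInner s 0 0 false 0 = (0, false) := by
      simpa using pvAInner_no_at s [] 0 0 0 (by omega) hnot
    have hbad : pvBadI s = 0 := by
      unfold pvBadI
      rw [if_neg (fun hm => by have := (pvBad_spec s hm).1; omega)]
    rw [hbad, hA]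
    simp
  | Nat.succ (Nat.succ n) =>
    have hbad : pvBadI s = 0 := by
      unfold pvBadI
      rw [if_neg (fun hm => by have := (pvBad_spec s hm).1; omega)]
    rw [hbad, if_pos (show n.succ.succ > 1 by omega), if_pos (show n.succ.succ ≠ 1 by omega)]
    omega
  | 1 =>
    rw [if_neg (show ¬((1:Nat) > 1) by omega), if_neg (show ¬((1:Nat) ≠ 1) by omega)]
    obtain ⟨u, v, rfl, hu⟩ := pvSplitFirst '@' s (List.count_pos_iff.1 (by omega))
    have hv : '@' ∉ v := by
      have h0 : u.count '@' = 0 := List.count_eq_zero.2 hu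
      rw [List.count_append, List.count_cons_self, h0] at hcnt
      exact List.count_eq_zero.1 (by omega)
    rw [pvDots_split u v hu]
    have hpre : pvAInner (u ++ '@' :: v) 0 0 false 0 = pvAInner v (u.length + 1) 0 true 0 := by
      rw [pvAInner_no_at u ('@' :: v) 0 0 0 (by omega) hu, Nat.zero_add, pvStepAt]
    by_cases h1 : '.' ∈ v
    case neg =>
      -- no dot after the '@': A tests s.drop 1, B rejects; the discrepancy is the indicator
      have hA : pvAInner (u ++ '@' :: v) 0 0 false 0 = (0, true) := by
        rw [hpre]
        simpa using pvAInner_clean v [] (u.length + 1) 0 0 (by omega) h1 hv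
      rw [hA, pvFilterDot_nil v _ h1]
      simp only [List.map_nil]
      have hiff : (u ++ '@' :: v).drop 1 ∈ pvTops ↔ (u ++ '@' :: v) ∈ pvBadList := by
        constructor
        · intro h
          cases u with
          | nil =>
            simp only [List.nil_append, List.drop_succ_cons, List.drop_zero] at h
            simp only [pvTops, List.mem_cons, List.not_mem_nil, or_false] at h
            rcases h with h | h | h <;> subst h <;> decide
          | cons c u' =>
            exfalso
            have hat : '@' ∈ (c :: u' ++ '@' :: v).drop 1 := by
              simp
            simp only [pvTops, List.mem_cons, List.not_mem_nil, or_false] at h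
            rcases h with h | h | h <;> rw [h] at hat <;> simp at hat
        · intro h
          simp only [pvBadList, List.mem_cons, List.not_mem_nil, or_false] at h
          rcases h with h | h | h <;> rw [h] <;> decide
      unfold pvBadI
      by_cases hdrop : (u ++ '@' :: v).drop 1 ∈ pvTops
      · have ht : (u ++ '@' :: v).tail ∈ pvTops := by rwa [← List.drop_one]
        simp [hiff.1 hdrop, ht]
      · have ht : (u ++ '@' :: v).tail ∉ pvTops := by rwa [← List.drop_one]
        rw [if_neg (fun hh => hdrop (hiff.2 hh))]
        simp [ht]
    case pos =>
      have hbad : pvBadI (u ++ '@' :: v) = 0 := by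
        unfold pvBadI
        rw [if_neg (fun hm => (pvBad_spec _ hm).2 (by simp [h1]))]
      rw [hbad, add_zero]
      obtain ⟨w1, w2, rfl, hw1⟩ := pvSplitFirst '.' v h1
      have hw1at : '@' ∉ w1 := fun hm => hv (List.mem_append_left _ hm)
      have hw2at : '@' ∉ w2 := fun hm => hv (List.mem_append_right _ (List.mem_cons_of_mem _ hm))
      have hpre2 : pvAInner (u ++ '@' :: (w1 ++ '.' :: w2)) 0 0 false 0
          = pvAInner w2 (u.length + 1 + w1.length + 1) (u.length + 1 + w1.length) true 1 := by
        rw [hpre, pvAInner_clean w1 ('.' :: w2) (u.length + 1) 0 0 (by omega) hw1 hw1at,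
            pvStepDot _ _ _ _ (by omega)]
      have hdl : ((PySem.List.enumerate (w1 ++ '.' :: w2) ((u.length : Int) + 1)).filter
            (fun q => decide (q.2 = '.'))).map (·.1)
          = ((u.length : Int) + 1 + w1.length) ::
            ((PySem.List.enumerate w2 ((u.length : Int) + 1 + w1.length + 1)).filter
              (fun q => decide (q.2 = '.'))).map (·.1) := by
        rw [PySem.List.enumerate_append, PySem.List.enumerate_cons, List.filter_append,
            pvFilterDot_nil w1 _ hw1, List.filter_cons]
        simp
      rw [hdl]
      by_cases h2 : '.' ∈ w2
      case neg =>
        -- exactly one dot after the '@': both count the same tail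
        have hA : pvAInner (u ++ '@' :: (w1 ++ '.' :: w2)) 0 0 false 0
            = (u.length + 1 + w1.length, true) := by
          rw [hpre2]
          simpa using pvAInner_clean w2 [] (u.length + 1 + w1.length + 1)
            (u.length + 1 + w1.length) 1 (by omega) h2 hw2at
        rw [hA, pvFilterDot_nil w2 _ h2]
        have ht : ((u.length : Int) + 1 + (w1.length : Int)).toNat + 1
            = u.length + 1 + w1.length + 1 := by omega
        simp [ht]
      case pos =>
        -- two or more dots after the '@': B rejects; A ends with domain = false or an empty tail
        obtain ⟨w2a, w2b, rfl, hw2a⟩ := pvSplitFirst '.' w2 h2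
        have hw2aat : '@' ∉ w2a := fun hm => hw2at (List.mem_append_left _ hm)
        have hA2 : pvAInner (u ++ '@' :: (w1 ++ '.' :: (w2a ++ '.' :: w2b))) 0 0 false 0
            = pvAInner w2b (u.length + 1 + w1.length + 1 + w2a.length + 1)
                (u.length + 1 + w1.length + 1 + w2a.length) true 2 := by
          rw [hpre2, pvAInner_clean w2a ('.' :: w2b) _ _ 1 (by omega) hw2a hw2aat,
              pvStepDot _ _ _ _ (by omega)]
        have hshape : ((PySem.List.enumerate (w2a ++ '.' :: w2b)
              ((u.length : Int) + 1 + w1.length + 1)).filter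
              (fun q => decide (q.2 = '.'))).map (·.1)
            = ((u.length : Int) + 1 + w1.length + 1 + w2a.length) ::
              ((PySem.List.enumerate w2b ((u.length : Int) + 1 + w1.length + 1 + w2a.length + 1)).filter
                (fun q => decide (q.2 = '.'))).map (·.1) := by
          rw [PySem.List.enumerate_append, PySem.List.enumerate_cons, List.filter_append,
              pvFilterDot_nil w2a _ hw2a, List.filter_cons]
          simp
        rw [hshape]
        cases w2b with
        | nil =>
          have hA3 : pvAInner (u ++ '@' :: (w1 ++ '.' :: (w2a ++ '.' :: []))) 0 0 false 0
              = (u.length + 1 + w1.length + 1 + w2a.length, true) := by rw [hA2]; rfl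
          rw [hA3]
          have hdrop : (u ++ '@' :: (w1 ++ '.' :: (w2a ++ '.' :: []))).drop
              ((u.length + 1 + w1.length + 1 + w2a.length) + 1) = [] := by
            apply List.drop_eq_nil_of_le
            simp
            omega
          rw [hdrop]
          simp [pvTops]
        | cons c w2b' =>
          have hA3 : (pvAInner (u ++ '@' :: (w1 ++ '.' :: (w2a ++ '.' :: (c :: w2b')))) 0 0 false 0).2
              = false := by rw [hA2, pvStepBreak]
          rw [if_neg (by rw [hA3]; rintro ⟨-, h⟩; exact Bool.false_ne_true h)]

theorem pvBody_eq (cnt : Int) (ans : String) :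
    pvABody cnt ans = pvBBody cnt ans + pvBadI ans.toList := by
  simp only [pvABody, pvBBody]
  exact pvCore ans.toList cnt

-- B's body shifts with its accumulator
theorem pvBBody_shift (c k : Int) (a : String) : pvBBody (c + k) a = pvBBody c a + k := by
  simp only [pvBBody]
  split
  · rfl
  · cases pvDots a.toList with
    | nil => rfl
    | cons x t =>
      cases t with
      | nil => dsimp only; split <;> ring
      | cons y t' => rfl

theorem pvFoldB_shift (l : List String) : ∀ (c k : Int),
    l.foldl pvBBody (c + k) = l.foldl pvBBody c + k := by
  induction l with
  | nil => intro c k; rfl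
  | cons a t ih =>
    intro c k
    simp only [List.foldl_cons, pvBBody_shift]
    exact ih _ k

-- master accounting: A = B + the number of miscounted answers
theorem pvMaster (l : List String) : ∀ (c : Int),
    l.foldl pvABody c = l.foldl pvBBody c + (l.map (fun a => pvBadI a.toList)).sum := by
  induction l with
  | nil => intro c; simp
  | cons a t ih =>
    intro c
    simp only [List.foldl_cons, List.map_cons, List.sum_cons, pvBody_eq]
    rw [ih, pvFoldB_shift]
    ring

theorem pvBadI_nonneg (s : List Char) : 0 ≤ pvBadI s := by
  unfold pvBadI; split <;> omega

-- ===== VERDICT (by name: the statements are the Claim_ definitions above) =====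
theorem solution_spec : Claim_unchanged_solution := by
  intro answers _ hnd
  unfold solution solution_alt
  rw [pvMaster]
  have hz : (answers.map (fun a => pvBadI a.toList)).sum = 0 := by
    apply List.sum_eq_zero
    intro x hx
    obtain ⟨a, ha, rfl⟩ := List.mem_map.1 hx
    unfold pvBadI
    rw [if_neg (fun hm => hnd ⟨a, ha, (pvBad_toList a).1 hm⟩)]
  rw [hz, add_zero]

theorem solution_changed : Claim_changed_solution := by
  unfold Claim_changed_solution; decide

theorem solution_tight : Claim_exact_solution := by
  intro answers _ hd
  obtain ⟨a, ha, hm0⟩ := hd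
  have hm : a.toList ∈ pvBadList := (pvBad_toList a).2 hm0
  have hmem : pvBadI a.toList ∈ answers.map (fun x => pvBadI x.toList) :=
    List.mem_map.2 ⟨a, ha, rfl⟩
  have h1 : (1:Int) ≤ (answers.map (fun x => pvBadI x.toList)).sum := by
    have := List.single_le_sum (fun x hx => by
      obtain ⟨b, _, rfl⟩ := List.mem_map.1 hx
      exact pvBadI_nonneg b.toList) _ hmem
    unfold pvBadI at this
    rw [if_pos hm] at this
    exact this
  have hM := pvMaster answers 0
  unfold solution solution_alt
  omega
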